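-- pv_equiv track=rewrite | github.com/WalrusCow/mastermind | mastermind.py | _guess
-- ===== SOURCE A (Python) =====
-- from collections import Counter
--
-- def _guess(secret, guess):
--     # Returns (exact, inexact)
--     guess = list(guess)
--     secret = list(secret)
--
--     exact = 0
--     for i, (g, s) in enumerate(zip(guess[::], secret[::])):
--         if g != s: continue
--         # Well, we are kinda modifying lists as we go through them
--         # which is generally a bad idea...
--         secret.pop(i - exact)
--         guess.pop(i - exact)
--         exact += 1
--
--     secretCount = Counter(secret)
--     guessCount = Counter(guess)
--
--     inexact = sum(min(guessCount[k], secretCount[k]) for k in guessCount)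
--     return exact, inexact
-- ===== SOURCE B (Python) =====
-- from collections import Counter
--
-- def _guess(secret, guess):
--     # exact = positional matches; total = color overlap ignoring position;
--     # inexact = total - exact (removing an exact match lowers that color's min by one).
--     exact = sum(1 for g, s in zip(guess, secret) if g == s)
--     secretCount = Counter(secret)
--     guessCount = Counter(guess)
--     total = sum(min(guessCount[c], secretCount[c]) for c in guessCount)
--     return exact, total - exact
-- ===== Notes on version B (the rewrite author's own statement) =====
-- stated objective: simpler
-- what changed: B never mutates or rebuilds the pegs: it counts exact matches directly over zip(guess, secret) and computes inexact as (sum of per-color min counts over the FULL lists) minus exact, instead of A's in-place pops of matched positions followed by Counters of the leftovers.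
import Mathlib
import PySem

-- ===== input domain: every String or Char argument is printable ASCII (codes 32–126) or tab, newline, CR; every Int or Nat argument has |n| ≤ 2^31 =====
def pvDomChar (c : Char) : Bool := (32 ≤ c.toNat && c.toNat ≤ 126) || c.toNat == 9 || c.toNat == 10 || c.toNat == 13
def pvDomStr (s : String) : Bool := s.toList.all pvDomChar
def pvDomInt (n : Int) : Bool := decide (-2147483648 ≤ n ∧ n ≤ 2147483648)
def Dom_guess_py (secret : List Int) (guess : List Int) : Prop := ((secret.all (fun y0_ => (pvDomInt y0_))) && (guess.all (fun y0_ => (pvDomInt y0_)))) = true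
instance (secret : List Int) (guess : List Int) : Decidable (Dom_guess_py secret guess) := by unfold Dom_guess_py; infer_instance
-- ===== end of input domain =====

-- B replaces A's in-place pops of matched pegs by direct counting: exact over the zip, inexact = (full-list per-colour min overlap) − exact; objective: simpler, no mutation.

-- ===== PORT A =====
-- the body of A's for-loop: state (secret, guess, exact), enumerated item (i, (g, s))
def stepA (st : List Int × List Int × Int) (p : Int × Int × Int) : List Int × List Int × Int :=
  if p.2.1 ≠ p.2.2 then st
  else
    match PySem.List.pop? st.1 (p.1 - st.2.2), PySem.List.pop? st.2.1 (p.1 - st.2.2) with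
    | some rs, some rg => (rs.2, rg.2, st.2.2 + 1)
    | _, _ => st  -- unreachable: the popped index i - exact is always in range (loop invariant `loopA` below)

def guess_py (secret : List Int) (guess : List Int) : List Int :=
  let st := (PySem.List.enumerate (List.zip guess secret)).foldl stepA (secret, guess, 0)
  let secretCount := PySem.Dict.counter st.1
  let guessCount := PySem.Dict.counter st.2.1
  let inexact := (guessCount.keys.map (fun k => min (guessCount.getD k 0) (secretCount.getD k 0))).sum
  [st.2.2, inexact]

-- ===== PORT B =====
def guess_py_alt (secret : List Int) (guess : List Int) : List Int :=
  let exact : Int := ((List.zip guess secret).countP (fun p => p.1 == p.2) : Nat)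
  let secretCount := PySem.Dict.counter secret
  let guessCount := PySem.Dict.counter guess
  let total := (guessCount.keys.map (fun c => min (guessCount.getD c 0) (secretCount.getD c 0))).sum
  [exact, total - exact]

-- ===== PRECONDITION & SPEC =====
def Spec_guess_py (secret : List Int) (guess : List Int) (out : List Int) : Prop := out = guess_py_alt secret guess
instance (secret : List Int) (guess : List Int) (out : List Int) : Decidable (Spec_guess_py secret guess out) := by unfold Spec_guess_py; infer_instance

-- ===== CLAIM (what is proved, stated in full; the proofs are below) =====
def Claim_equal_guess_py : Prop := ∀ (secret : List Int) (guess : List Int), Dom_guess_py secret guess → Spec_guess_py secret guess (guess_py secret guess)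

-- ===== LEMMAS AND PROOFS =====

-- leftover (secret, guess) elements of the zipped prefix after A pops the positional matches
def lovP : List (Int × Int) → List Int × List Int
  | [] => ([], [])
  | (g, s) :: ps => if g = s then lovP ps else (s :: (lovP ps).1, g :: (lovP ps).2)

-- number of positional matches of colour k in the zipped prefix
def eC (k : Int) (ps : List (Int × Int)) : Nat := ps.countP (fun p => p.1 == p.2 && p.1 == k)

-- total number of positional matches
def EP (ps : List (Int × Int)) : Nat := ps.countP (fun p => p.1 == p.2)

lemma pop_mid (Ls T : List Int) (x : Int) :
    PySem.List.pop? (Ls ++ x :: T) ((Ls.length : Nat) : Int) = some (x, Ls ++ T) := by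
  rw [PySem.List.pop?_natCast _ _ (by simp)]
  rw [List.eraseIdx_append_of_length_le (le_refl _)]
  simp

-- the invariant of A's mutating loop: before item i, state = (prefix-leftovers ++ rest, …, matches so far)
lemma loopA (ps : List (Int × Int)) : ∀ (Ls Lg Es Eg : List Int) (e : Nat), Ls.length = Lg.length →
    (PySem.List.enumerate ps (((e + Ls.length : Nat) : Int))).foldl stepA
      (Ls ++ ps.map Prod.snd ++ Es, Lg ++ ps.map Prod.fst ++ Eg, ((e : Nat) : Int))
    = (Ls ++ (lovP ps).1 ++ Es, Lg ++ (lovP ps).2 ++ Eg, ((e + EP ps : Nat) : Int)) := by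
  induction ps with
  | nil => intro Ls Lg Es Eg e h; simp [PySem.List.enumerate, lovP, EP]
  | cons p ps ih =>
    intro Ls Lg Es Eg e h
    obtain ⟨g, s⟩ := p
    simp only [PySem.List.enumerate, List.foldl_cons]
    by_cases hgs : g = s
    · subst hgs
      have hstep : stepA (Ls ++ List.map Prod.snd ((g, g) :: ps) ++ Es, Lg ++ List.map Prod.fst ((g, g) :: ps) ++ Eg, ((e : Nat) : Int)) (((e + Ls.length : Nat) : Int), g, g)
          = (Ls ++ List.map Prod.snd ps ++ Es, Lg ++ List.map Prod.fst ps ++ Eg, (((e + 1 : Nat)) : Int)) := by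
        simp only [stepA, List.map_cons, List.cons_append, List.append_assoc]
        rw [if_neg (by simp)]
        have hidx : ((e + Ls.length : Nat) : Int) - ((e : Nat) : Int) = ((Ls.length : Nat) : Int) := by push_cast; ring
        rw [hidx, pop_mid Ls _ g, h, pop_mid Lg _ g]
        simp
      rw [hstep]
      have hstart : ((e + Ls.length : Nat) : Int) + 1 = (((e + 1) + Ls.length : Nat) : Int) := by push_cast; ring
      rw [hstart, ih Ls Lg Es Eg (e + 1) h]
      have : (e + 1) + EP ps = e + EP ((g, g) :: ps) := by simp [EP]; ring
      rw [this]
      simp [lovP]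
    · rw [show stepA (Ls ++ List.map Prod.snd ((g, s) :: ps) ++ Es, Lg ++ List.map Prod.fst ((g, s) :: ps) ++ Eg, ((e : Nat) : Int)) (((e + Ls.length : Nat) : Int), g, s)
          = (Ls ++ List.map Prod.snd ((g, s) :: ps) ++ Es, Lg ++ List.map Prod.fst ((g, s) :: ps) ++ Eg, ((e : Nat) : Int)) from by
        simp only [stepA]; rw [if_pos (by simpa using hgs)]]
      have h1 : Ls ++ List.map Prod.snd ((g, s) :: ps) ++ Es = (Ls ++ [s]) ++ List.map Prod.snd ps ++ Es := by simp
      have h2 : Lg ++ List.map Prod.fst ((g, s) :: ps) ++ Eg = (Lg ++ [g]) ++ List.map Prod.fst ps ++ Eg := by simp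
      have h3 : ((e + Ls.length : Nat) : Int) + 1 = ((e + (Ls ++ [s]).length : Nat) : Int) := by simp; ring
      rw [h1, h2, h3, ih (Ls ++ [s]) (Lg ++ [g]) Es Eg e (by simp [h])]
      have h4 : EP ps = EP ((g, s) :: ps) := by simp [EP, hgs]
      rw [h4]
      simp [lovP, hgs]

lemma zip_snd : ∀ (l1 l2 : List Int), (List.zip l1 l2).map Prod.snd ++ l2.drop l1.length = l2 := by
  intro l1
  induction l1 with
  | nil => simp
  | cons a t ih => intro l2; cases l2 with
    | nil => simp
    | cons b u => simp [ih]

lemma zip_fst : ∀ (l1 l2 : List Int), (List.zip l1 l2).map Prod.fst ++ l1.drop l2.length = l1 := by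
  intro l1
  induction l1 with
  | nil => simp
  | cons a t ih => intro l2; cases l2 with
    | nil => simp
    | cons b u => simp [ih]

lemma lov_count (ps : List (Int × Int)) (k : Int) :
    ((lovP ps).1).count k + eC k ps = (ps.map Prod.snd).count k ∧
    ((lovP ps).2).count k + eC k ps = (ps.map Prod.fst).count k := by
  induction ps with
  | nil => simp [lovP, eC]
  | cons p ps ih =>
    obtain ⟨ih1, ih2⟩ := ih
    obtain ⟨g, s⟩ := p
    by_cases h : g = s
    · subst h
      simp only [lovP, eC, List.countP_cons, List.map_cons, List.count_cons] at *
      by_cases hk : g = k <;> constructor <;> simp [hk] <;> omega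
    · simp only [lovP, if_neg h, eC, List.countP_cons, List.map_cons, List.count_cons] at *
      have hgs : (g == s) = false := by simp [h]
      simp only [hgs, Bool.false_and, Bool.false_eq_true, ite_false]
      constructor <;> by_cases hk : g = k <;> by_cases hs : s = k <;> simp [hk, hs] <;> omega

lemma lov_sub (ps : List (Int × Int)) :
    (∀ x ∈ (lovP ps).1, x ∈ ps.map Prod.snd) ∧ (∀ x ∈ (lovP ps).2, x ∈ ps.map Prod.fst) := by
  induction ps with
  | nil => simp [lovP]
  | cons p ps ih =>
    obtain ⟨g, s⟩ := p
    by_cases h : g = s <;>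
      simp only [lovP, h, if_pos, ite_false, List.map_cons, List.mem_cons] <;>
      constructor <;> intro x hx
    · exact Or.inr (ih.1 x hx)
    · exact Or.inr (ih.2 x hx)
    · rcases hx with rfl | hx
      · exact Or.inl rfl
      · exact Or.inr (ih.1 x hx)
    · rcases hx with rfl | hx
      · exact Or.inl rfl
      · exact Or.inr (ih.2 x hx)

-- summed over any key set containing every matched colour, the per-colour match counts add up to EP
lemma sum_eC (ps : List (Int × Int)) : ∀ (F : Finset Int), (∀ p ∈ ps, p.1 = p.2 → p.1 ∈ F) →
    (∑ k ∈ F, eC k ps) = EP ps := by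
  induction ps with
  | nil => intro F _; simp [eC, EP]
  | cons p ps ih =>
    intro F hF
    obtain ⟨g, s⟩ := p
    have : ∀ k, eC k ((g, s) :: ps) = eC k ps + (if (g = s ∧ g = k) then 1 else 0) := by
      intro k
      simp only [eC, List.countP_cons, Bool.and_eq_true, beq_iff_eq]
    simp only [this, Finset.sum_add_distrib]
    rw [ih F (fun p hp => hF p (List.mem_cons_of_mem _ hp))]
    by_cases hgs : g = s
    · have hg : g ∈ F := hF (g, s) (List.mem_cons_self) hgs
      have hfun : (fun k => if (g = s ∧ g = k) then (1:Nat) else 0) = (fun k => if g = k then 1 else 0) := by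
        funext k; simp [hgs]
      rw [hfun, Finset.sum_ite_eq F g (fun _ => 1), if_pos hg]
      simp [EP, hgs]
    · have : (∑ k ∈ F, if (g = s ∧ g = k) then 1 else 0) = 0 := by
        apply Finset.sum_eq_zero; intro k _; simp [hgs]
      rw [this]
      simp [EP, hgs]

-- sum over the distinct keys of a list = Finset sum over its toFinset
lemma ofList_sum (X : List Int) (f : Int → Int) :
    ((PySem.Set.ofList X).map f).sum = ∑ k ∈ X.toFinset, f k := by
  rw [← List.sum_toFinset f (PySem.Set.nodup_ofList X)]
  congr 1
  ext k
  simp [PySem.Set.mem_ofList]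

-- the central identity: the min-overlap sum of the leftovers is the full min-overlap sum minus the exact matches
lemma key_sum (ps : List (Int × Int)) (Es Eg : List Int) :
    ((PySem.Set.ofList ((lovP ps).2 ++ Eg)).map
        (fun k => min (((((lovP ps).2 ++ Eg).count k : Nat)) : Int) (((((lovP ps).1 ++ Es).count k : Nat)) : Int))).sum
    = ((PySem.Set.ofList (ps.map Prod.fst ++ Eg)).map
        (fun k => min ((((ps.map Prod.fst ++ Eg).count k : Nat)) : Int) ((((ps.map Prod.snd ++ Es).count k : Nat)) : Int))).sum
      - ((EP ps : Nat) : Int) := by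
  rw [ofList_sum, ofList_sum]
  have hpt : ∀ k : Int,
      min ((((lovP ps).2 ++ Eg).count k : Nat) : Int) ((((lovP ps).1 ++ Es).count k : Nat) : Int)
      = min (((ps.map Prod.fst ++ Eg).count k : Nat) : Int) (((ps.map Prod.snd ++ Es).count k : Nat) : Int)
        - ((eC k ps : Nat) : Int) := by
    intro k
    obtain ⟨h1, h2⟩ := lov_count ps k
    have e1 : (((lovP ps).2 ++ Eg).count k : Int) = ((ps.map Prod.fst ++ Eg).count k : Int) - (eC k ps : Int) := by
      simp only [List.count_append]; push_cast; omega
    have e2 : (((lovP ps).1 ++ Es).count k : Int) = ((ps.map Prod.snd ++ Es).count k : Int) - (eC k ps : Int) := by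
      simp only [List.count_append]; push_cast; omega
    rw [e1, e2, min_sub_sub_right]
  have hsub : ((lovP ps).2 ++ Eg).toFinset ⊆ (ps.map Prod.fst ++ Eg).toFinset := by
    intro k hk
    simp only [List.mem_toFinset, List.mem_append] at *
    rcases hk with hk | hk
    · exact Or.inl ((lov_sub ps).2 k hk)
    · exact Or.inr hk
  rw [Finset.sum_subset hsub (by
    intro k _ hk
    have hc : ((lovP ps).2 ++ Eg).count k = 0 := by
      rw [List.count_eq_zero]
      simpa [List.mem_toFinset] using hk
    rw [hc]
    simpa using min_eq_left (by positivity : (0:Int) ≤ ((((lovP ps).1 ++ Es).count k : Nat) : Int)))]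
  rw [Finset.sum_congr rfl (fun k _ => hpt k), Finset.sum_sub_distrib]
  congr 1
  have : (∑ k ∈ (ps.map Prod.fst ++ Eg).toFinset, ((eC k ps : Nat) : Int))
      = (((∑ k ∈ (ps.map Prod.fst ++ Eg).toFinset, eC k ps) : Nat) : Int) := by push_cast; rfl
  rw [this, sum_eC ps _ (by
    intro p hp hpe
    simp only [List.mem_toFinset, List.mem_append]
    exact Or.inl (List.mem_map.mpr ⟨p, hp, rfl⟩))]

-- ===== VERDICT (by name: the statement is the Claim_ definition above) =====
theorem guess_py_spec : Claim_equal_guess_py := by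
  intro secret guess _
  unfold Spec_guess_py
  have hsec : (List.zip guess secret).map Prod.snd ++ secret.drop guess.length = secret := zip_snd guess secret
  have hgu : (List.zip guess secret).map Prod.fst ++ guess.drop secret.length = guess := zip_fst guess secret
  have hloop := loopA (List.zip guess secret) [] [] (secret.drop guess.length) (guess.drop secret.length) 0 rfl
  simp only [List.nil_append, List.length_nil, Nat.add_zero, Nat.zero_add, Nat.cast_zero] at hloop
  rw [hsec, hgu] at hloop
  simp only [guess_py, guess_py_alt, PySem.Dict.keys_counter, PySem.Dict.getD_counter]
  rw [hloop]
  rw [key_sum (List.zip guess secret) (secret.drop guess.length) (guess.drop secret.length)]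
  rw [hsec, hgu]
  simp [EP]
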